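-- pv_equiv track=rewrite | github.com/sebastian-gh/pi-ki-musicvision | pi-ki-musicvision.py | build_note_list
-- ===== SOURCE A (Python) =====
-- SCALES = {
--     "chromatic":   [0, 1, 2, 3, 4, 5, 6, 7, 8, 9, 10, 11],
--     "major":       [0, 2, 4, 5, 7, 9, 11],
--     "minor":       [0, 2, 3, 5, 7, 8, 10],
--     "pentatonic":  [0, 2, 4, 7, 9],
--     "blues":       [0, 3, 5, 6, 7, 10],
-- }
--
-- def build_note_list(scale_name, root, note_min, note_max):
--     """Build a list of MIDI notes within the given range that belong to the scale."""
--     intervals = SCALES.get(scale_name, SCALES["chromatic"])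
--     notes = []
--     for midi_note in range(note_min, note_max + 1):
--         degree = (midi_note - root) % 12
--         if degree in intervals:
--             notes.append(midi_note)
--     return notes
-- ===== SOURCE B (Python) =====
-- SCALES = {
--     "chromatic":   [0, 1, 2, 3, 4, 5, 6, 7, 8, 9, 10, 11],
--     "major":       [0, 2, 4, 5, 7, 9, 11],
--     "minor":       [0, 2, 3, 5, 7, 8, 10],
--     "pentatonic":  [0, 2, 4, 7, 9],
--     "blues":       [0, 3, 5, 6, 7, 10],
-- }
--
-- def build_note_list(scale_name, root, note_min, note_max):
--     """Generate the scale's notes octave by octave instead of scanning every MIDI note."""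
--     intervals = SCALES.get(scale_name, SCALES["chromatic"])
--     lo = (note_min - root) // 12
--     hi = (note_max - root) // 12
--     notes = []
--     for octave in range(lo, hi + 1):
--         base = root + 12 * octave
--         for iv in intervals:
--             n = base + iv
--             if note_min <= n <= note_max:
--                 notes.append(n)
--     return notes
-- ===== Notes on version B (the rewrite author's own statement) =====
-- stated objective: faster
-- what changed: Instead of scanning every MIDI note in [note_min, note_max] and testing its scale degree for membership in the interval list, B generates the candidate notes directly: it iterates over the covering octave indices floor((note_min-root)/12)..floor((note_max-root)/12) and emits root + 12*octave + interval for each interval, keeping only those inside the window, which is already in ascending order.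
import Mathlib
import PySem

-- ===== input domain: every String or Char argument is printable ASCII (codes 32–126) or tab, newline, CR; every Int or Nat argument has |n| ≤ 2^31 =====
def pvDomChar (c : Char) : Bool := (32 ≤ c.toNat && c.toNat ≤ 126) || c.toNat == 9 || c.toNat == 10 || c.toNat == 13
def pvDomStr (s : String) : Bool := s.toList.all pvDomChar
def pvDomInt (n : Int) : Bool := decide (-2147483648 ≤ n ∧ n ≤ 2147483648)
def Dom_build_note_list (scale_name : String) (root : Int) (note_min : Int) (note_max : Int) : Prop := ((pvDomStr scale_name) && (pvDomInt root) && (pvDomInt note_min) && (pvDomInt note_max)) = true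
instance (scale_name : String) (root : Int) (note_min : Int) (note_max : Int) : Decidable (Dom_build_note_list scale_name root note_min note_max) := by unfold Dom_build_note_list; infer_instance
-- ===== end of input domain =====

-- B generates the scale's notes octave by octave (already in ascending order) instead of
-- scanning every MIDI note in the window and testing its degree; objective: faster (about
-- 12x fewer loop iterations and no per-note membership test).

-- ===== PORT A =====
-- module constant SCALES (shared context of both A and B)
def pvSCALES : PySem.Dict String (List Int) :=
  PySem.Dict.ofList
    [("chromatic",  [0, 1, 2, 3, 4, 5, 6, 7, 8, 9, 10, 11]),
     ("major",      [0, 2, 4, 5, 7, 9, 11]),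
     ("minor",      [0, 2, 3, 5, 7, 8, 10]),
     ("pentatonic", [0, 2, 4, 7, 9]),
     ("blues",      [0, 3, 5, 6, 7, 10])]

-- SCALES.get(scale_name, SCALES["chromatic"])  ("chromatic" is present, so the [] default of the inner lookup is never used)
def pvIntervals (scale_name : String) : List Int :=
  pvSCALES.getD scale_name (pvSCALES.getD "chromatic" [])

def build_note_list (scale_name : String) (root : Int) (note_min : Int) (note_max : Int) : List Int :=
  let intervals := pvIntervals scale_name
  (PySem.List.pyRange note_min (note_max + 1) 1).foldl
    (fun notes midi_note =>
      let degree := PySem.Int.mod (midi_note - root) 12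
      if degree ∈ intervals then notes ++ [midi_note] else notes) []

-- ===== PORT B =====
def build_note_list_alt (scale_name : String) (root : Int) (note_min : Int) (note_max : Int) : List Int :=
  let intervals := pvIntervals scale_name
  let lo := PySem.Int.floordiv (note_min - root) 12
  let hi := PySem.Int.floordiv (note_max - root) 12
  (PySem.List.pyRange lo (hi + 1) 1).foldl
    (fun notes octave =>
      let base := root + 12 * octave
      intervals.foldl
        (fun notes iv =>
          let n := base + iv
          if note_min ≤ n ∧ n ≤ note_max then notes ++ [n] else notes) notes) []

-- ===== PRECONDITION & SPEC =====
def Spec_build_note_list (scale_name : String) (root : Int) (note_min : Int) (note_max : Int) (out : List Int) : Prop := out = build_note_list_alt scale_name root note_min note_max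
instance (scale_name : String) (root : Int) (note_min : Int) (note_max : Int) (out : List Int) : Decidable (Spec_build_note_list scale_name root note_min note_max out) := by unfold Spec_build_note_list; infer_instance

-- ===== CLAIM (what is proved, stated in full; the proofs are below) =====
def Claim_equal_build_note_list : Prop := ∀ (scale_name : String) (root : Int) (note_min : Int) (note_max : Int), Dom_build_note_list scale_name root note_min note_max → Spec_build_note_list scale_name root note_min note_max (build_note_list scale_name root note_min note_max)

-- ===== LEMMAS AND PROOFS =====

theorem pvSCALES_eq :
    pvSCALES = PySem.Dict.mk
      [("chromatic",  [0, 1, 2, 3, 4, 5, 6, 7, 8, 9, 10, 11]),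
       ("major",      [0, 2, 4, 5, 7, 9, 11]),
       ("minor",      [0, 2, 3, 5, 7, 8, 10]),
       ("pentatonic", [0, 2, 4, 7, 9]),
       ("blues",      [0, 3, 5, 6, 7, 10])] := by rfl

-- pvIntervals always returns one of the five literal interval lists
theorem pvIntervals_cases (s : String) :
    pvIntervals s = [0, 1, 2, 3, 4, 5, 6, 7, 8, 9, 10, 11] ∨
    pvIntervals s = [0, 2, 4, 5, 7, 9, 11] ∨
    pvIntervals s = [0, 2, 3, 5, 7, 8, 10] ∨
    pvIntervals s = [0, 2, 4, 7, 9] ∨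
    pvIntervals s = [0, 3, 5, 6, 7, 10] := by
  unfold pvIntervals
  rw [pvSCALES_eq]
  simp only [PySem.Dict.getD, PySem.Dict.get?_mk_cons]
  split_ifs <;> simp_all [PySem.Dict.get?]

theorem pvIntervals_pairwise (s : String) : (pvIntervals s).Pairwise (· < ·) := by
  rcases pvIntervals_cases s with h | h | h | h | h <;> rw [h] <;> decide

theorem pvIntervals_bounds (s : String) : ∀ iv ∈ pvIntervals s, 0 ≤ iv ∧ iv < 12 := by
  rcases pvIntervals_cases s with h | h | h | h | h <;> rw [h] <;> decide

-- A's loop is a filter over the scanned range (generic append-if fold)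
theorem foldl_if_filter (p : Int → Prop) [DecidablePred p] (l : List Int) (acc : List Int) :
    l.foldl (fun notes n => if p n then notes ++ [n] else notes) acc
      = acc ++ l.filter (fun n => decide (p n)) := by
  induction l generalizing acc with
  | nil => simp
  | cons x xs ih => by_cases h : p x <;> simp [h, ih]

-- B's inner loop filters and shifts the interval list
theorem foldl_inner (p : Int → Prop) [DecidablePred p] (f : Int → Int) (l : List Int) (acc : List Int) :
    l.foldl (fun notes iv => if p (f iv) then notes ++ [f iv] else notes) acc
      = acc ++ (l.filter (fun iv => decide (p (f iv)))).map f := by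
  induction l generalizing acc with
  | nil => simp
  | cons x xs ih => by_cases h : p (f x) <;> simp [h, ih]

-- B's outer loop is a flatMap of the per-octave chunks
theorem foldl_outer (g : Int → List Int) (l : List Int) (acc : List Int) :
    l.foldl (fun notes o => notes ++ g o) acc = acc ++ l.flatMap g := by
  induction l generalizing acc with
  | nil => simp
  | cons x xs ih => simp [List.foldl_cons, ih]

def pvChunk (s : String) (r mn mx o : Int) : List Int :=
  ((pvIntervals s).filter (fun iv => decide (mn ≤ r + 12 * o + iv ∧ r + 12 * o + iv ≤ mx))).map
    (fun iv => r + 12 * o + iv)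

theorem B_eq_flatMap (s : String) (r mn mx : Int) :
    build_note_list_alt s r mn mx
      = (PySem.List.pyRange (PySem.Int.floordiv (mn - r) 12) (PySem.Int.floordiv (mx - r) 12 + 1) 1).flatMap
          (pvChunk s r mn mx) := by
  unfold build_note_list_alt
  simp only []
  rw [show (fun (notes : List Int) (octave : Int) =>
        (pvIntervals s).foldl (fun notes iv =>
          if mn ≤ r + 12 * octave + iv ∧ r + 12 * octave + iv ≤ mx then notes ++ [r + 12 * octave + iv] else notes) notes)
      = fun notes o => notes ++ pvChunk s r mn mx o from ?_]
  · exact foldl_outer _ _ _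
  · funext notes o
    exact foldl_inner (fun m => mn ≤ m ∧ m ≤ mx) (fun iv => r + 12 * o + iv) (pvIntervals s) notes

theorem A_eq_filter (s : String) (r mn mx : Int) :
    build_note_list s r mn mx
      = (PySem.List.pyRange mn (mx + 1) 1).filter (fun n => decide (PySem.Int.mod (n - r) 12 ∈ pvIntervals s)) := by
  unfold build_note_list
  exact foldl_if_filter (fun n => PySem.Int.mod (n - r) 12 ∈ pvIntervals s) _ []

theorem mem_A (s : String) (r mn mx n : Int) :
    n ∈ build_note_list s r mn mx ↔ (mn ≤ n ∧ n ≤ mx ∧ (n - r) % 12 ∈ pvIntervals s) := by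
  rw [A_eq_filter]
  simp only [List.mem_filter, PySem.List.mem_pyRange_one, decide_eq_true_eq,
        PySem.Int.mod_eq_emod_of_pos (a := n - r) (by norm_num : (0:Int) < 12)]
  constructor
  · rintro ⟨⟨h1, h2⟩, h3⟩; exact ⟨h1, by omega, h3⟩
  · rintro ⟨h1, h2, h3⟩; exact ⟨⟨h1, by omega⟩, h3⟩

theorem mem_B (s : String) (r mn mx n : Int) :
    n ∈ build_note_list_alt s r mn mx ↔ (mn ≤ n ∧ n ≤ mx ∧ (n - r) % 12 ∈ pvIntervals s) := by
  rw [B_eq_flatMap]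
  simp only [List.mem_flatMap, PySem.List.mem_pyRange_one, pvChunk, List.mem_map, List.mem_filter,
    decide_eq_true_eq, PySem.Int.floordiv_eq_ediv_of_pos (by norm_num : (0:Int) < 12)]
  constructor
  · rintro ⟨o, ⟨hlo, hhi⟩, iv, ⟨hiv, hcond⟩, rfl⟩
    have hb := pvIntervals_bounds s iv hiv
    have : (r + 12 * o + iv - r) % 12 = iv := by omega
    rw [this]
    exact ⟨hcond.1, hcond.2, hiv⟩
  · rintro ⟨h1, h2, h3⟩
    refine ⟨(n - r) / 12, ⟨by omega, by omega⟩, (n - r) % 12, ⟨h3, by omega⟩, by omega⟩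

theorem pairwise_A (s : String) (r mn mx : Int) : (build_note_list s r mn mx).Pairwise (· < ·) := by
  rw [A_eq_filter]
  exact (PySem.List.pairwise_lt_pyRange_one mn (mx + 1)).filter _

theorem pairwise_B (s : String) (r mn mx : Int) : (build_note_list_alt s r mn mx).Pairwise (· < ·) := by
  rw [B_eq_flatMap]
  rw [List.pairwise_flatMap]
  constructor
  · intro o _
    unfold pvChunk
    refine List.Pairwise.map _ ?_ ((pvIntervals_pairwise s).filter _)
    intro a b h
    omega
  · refine (PySem.List.pairwise_lt_pyRange_one _ _).imp_of_mem ?_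
    intro o o' _ _ hlt x hx y hy
    unfold pvChunk at hx hy
    simp only [List.mem_map, List.mem_filter, decide_eq_true_eq] at hx hy
    obtain ⟨iv, ⟨hiv, _⟩, rfl⟩ := hx
    obtain ⟨iv', ⟨hiv', _⟩, rfl⟩ := hy
    have h1 := pvIntervals_bounds s iv hiv
    have h2 := pvIntervals_bounds s iv' hiv'
    omega

-- ===== VERDICT (by name: the statement is the Claim_ definition above) =====
theorem build_note_list_spec : Claim_equal_build_note_list := by
  intro s r mn mx _
  unfold Spec_build_note_list
  have hA := pairwise_A s r mn mx
  have hB := pairwise_B s r mn mx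
  have hperm : List.Perm (build_note_list s r mn mx) (build_note_list_alt s r mn mx) := by
    rw [List.perm_ext_iff_of_nodup (hA.imp (fun h => by omega)) (hB.imp (fun h => by omega))]
    intro n
    rw [mem_A, mem_B]
  exact List.Perm.eq_of_pairwise (fun a b _ _ h1 h2 => absurd h2 (by omega)) hA hB hperm
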